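-- pv_equiv track=rewrite | github.com/alobrv/interview-coding-challenge | challenge_3.py | count_subsets_equal_color
-- ===== SOURCE A (Python) =====
-- def find_partitions(arr):
--     """
--     Finds all possible partitions of an array into subsets of equal length where length = 3n.
--
--     Args:
--         arr (list): The input array.
--
--     Returns:
--         list: A list of lists, where each inner list is a partition of the array.
--     """
--     n = len(arr)
--     partitions = []
--
--     # To optimize, we only check subset lengths until n//2 + 1, and then append the length = n case,
--     # since there are no possible divisors between n//2 + 1 and n itself
--     # e.g. for an array of length 24, we only check lengths 3, 6, 9, 12 and 24
--     for length in range(3, n//2 + 1, 3):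
--         if n % length == 0:
--             partition = [arr[i:i+length] for i in range(0, n, length)]
--             partitions.append(partition)
--     partitions.append([arr])
--
--     return partitions
--
-- def count_subsets_equal_color(arr):
--     """
--     For every posible partition of an array, counts the number of subsets for every partition in which every
--     subset has an equal number of 'b', 'g', and 'y' elements.
--
--     Args:
--         arr (list): The input array.
--
--     Returns:
--         int: The count of subsets that satisfy the condition.
--     """
--
--     # Arrays without 3n elements will always return 0, since themselves cannot have equal representation and
--     # there are no partitions of them into subsets of 3n elements
--     # Arrays without equal representation cannot have partitions where all subsets have equal representation
--     if not arr or len(arr) % 3 != 0 or not arr.count('b') == arr.count('g') == arr.count('y'):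
--         return 0
--
--     # For every possible partition, if every subset has equal representation, we add the number of subsets
--     count = 0
--     for partition in find_partitions(arr):
--         if all(subset.count('b') == subset.count('g') == subset.count('y') for subset in partition):
--             count += len(partition)
--
--     return count
-- ===== SOURCE B (Python) =====
-- def count_subsets_equal_color(arr):
--     n = len(arr)
--     if n == 0 or n % 3 != 0:
--         return 0
--     # zero[k] == True iff the first k elements hold equally many 'b', 'g' and 'y'
--     d1 = d2 = 0  # d1 = #b - #g, d2 = #g - #y over the prefix read so far
--     zero = [True]
--     for x in arr:
--         if x == 'b':
--             d1 += 1
--         elif x == 'g':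
--             d1 -= 1
--             d2 += 1
--         elif x == 'y':
--             d2 -= 1
--         zero.append(d1 == 0 and d2 == 0)
--     if not zero[n]:
--         return 0
--     # every chunk of a length-L partition is balanced iff every chunk boundary
--     # has a balanced prefix; each such partition contributes n // L subsets
--     count = 1  # the single-chunk partition [arr], balanced by the check above
--     for L in range(3, n // 2 + 1, 3):
--         if n % L == 0 and all(zero[k] for k in range(0, n, L)):
--             count += n // L
--     return count
-- ===== Notes on version B (the rewrite author's own statement) =====
-- stated objective: alternative
-- what changed: Instead of materialising every partition as lists of slices and re-counting 'b'/'g'/'y' inside every chunk of every candidate length, B makes one pass over the array computing for each prefix whether it is colour-balanced, and then decides each candidate chunk length L by inspecting only the chunk boundaries.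
import Mathlib
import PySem

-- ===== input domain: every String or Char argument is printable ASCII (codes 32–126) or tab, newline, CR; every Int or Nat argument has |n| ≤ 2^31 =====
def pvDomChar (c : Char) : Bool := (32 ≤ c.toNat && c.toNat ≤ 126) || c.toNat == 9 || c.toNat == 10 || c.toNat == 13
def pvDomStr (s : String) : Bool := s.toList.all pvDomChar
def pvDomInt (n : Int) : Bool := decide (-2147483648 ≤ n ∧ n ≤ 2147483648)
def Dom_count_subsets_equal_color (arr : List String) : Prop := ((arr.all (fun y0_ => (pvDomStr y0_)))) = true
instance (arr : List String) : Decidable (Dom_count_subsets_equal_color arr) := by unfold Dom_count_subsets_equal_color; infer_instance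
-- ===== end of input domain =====

-- B replaces A's per-partition chunk recounting by a single prefix-balance pass
-- plus a boundary check per candidate chunk length (alternative algorithm, same result).

-- ===== PORT A =====
-- A builds every equal-chunk partition as lists of slices, then re-counts the
-- three colours inside every chunk of every partition.
def find_partitions (arr : List String) : List (List (List String)) :=
  let n : Int := (arr.length : Int)
  let partitions : List (List (List String)) :=
    (PySem.List.pyRange 3 (PySem.Int.floordiv n 2 + 1) 3).foldl
      (fun partitions length =>
        if PySem.Int.mod n length == 0 then
          partitions ++ [(PySem.List.pyRange 0 n length).map
            (fun i => PySem.List.slice arr (some i) (some (i + length)))]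
        else partitions) []
  partitions ++ [[arr]]

def count_subsets_equal_color (arr : List String) : Int :=
  if arr == [] || !(PySem.Int.mod (arr.length : Int) 3 == 0)
      || !((PySem.List.count arr "b" == PySem.List.count arr "g")
           && (PySem.List.count arr "g" == PySem.List.count arr "y")) then 0
  else
    (find_partitions arr).foldl
      (fun count partition =>
        if partition.all (fun subset =>
            (PySem.List.count subset "b" == PySem.List.count subset "g")
            && (PySem.List.count subset "g" == PySem.List.count subset "y"))
        then count + (partition.length : Int) else count) 0

-- ===== PORT B =====
-- B makes one pass computing, for every prefix, whether it is colour-balanced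
-- (zero), then checks each candidate chunk length via its chunk boundaries only.
def pvStep (s : (Int × Int) × List Bool) (x : String) : (Int × Int) × List Bool :=
  let d1 := s.1.1
  let d2 := s.1.2
  let p : Int × Int :=
    if x == "b" then (d1 + 1, d2)
    else if x == "g" then (d1 - 1, d2 + 1)
    else if x == "y" then (d1, d2 - 1)
    else (d1, d2)
  (p, s.2 ++ [p.1 == 0 && p.2 == 0])

def count_subsets_equal_color_alt (arr : List String) : Int :=
  let n : Int := (arr.length : Int)
  if n == 0 || !(PySem.Int.mod n 3 == 0) then 0
  else
    let zero : List Bool := (arr.foldl pvStep ((0, 0), [true])).2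
    if !(PySem.List.pyGetD zero n false) then 0
    else
      (PySem.List.pyRange 3 (PySem.Int.floordiv n 2 + 1) 3).foldl
        (fun count L =>
          if PySem.Int.mod n L == 0
              && (PySem.List.pyRange 0 n L).all (fun k => PySem.List.pyGetD zero k false)
          then count + PySem.Int.floordiv n L else count) 1
-- ===== PRECONDITION & SPEC =====
def Spec_count_subsets_equal_color (arr : List String) (out : Int) : Prop := out = count_subsets_equal_color_alt arr
instance (arr : List String) (out : Int) : Decidable (Spec_count_subsets_equal_color arr out) := by unfold Spec_count_subsets_equal_color; infer_instance

-- ===== CLAIM (what is proved, stated in full; the proofs are below) =====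
def Claim_equal_count_subsets_equal_color : Prop := ∀ (arr : List String), Dom_count_subsets_equal_color arr → Spec_count_subsets_equal_color arr (count_subsets_equal_color arr)

-- ===== LEMMAS AND PROOFS =====

-- ===== VERDICT (by name: the statement is the Claim_ definition above) =====
-- helper notions for the proofs: integer colour-count differences over prefixes
def d1v (l : List String) : Int := (PySem.List.count l "b" : Int) - (PySem.List.count l "g" : Int)

def d2v (l : List String) : Int := (PySem.List.count l "g" : Int) - (PySem.List.count l "y" : Int)

def balB (l : List String) : Bool :=
  (PySem.List.count l "b" == PySem.List.count l "g")
  && (PySem.List.count l "g" == PySem.List.count l "y")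

def zA (arr : List String) (k : Nat) : Bool := (d1v (arr.take k) == 0) && (d2v (arr.take k) == 0)

lemma d1v_append (a b : List String) : d1v (a ++ b) = d1v a + d1v b := by
  simp only [d1v, PySem.List.count_eq, List.count_append]
  push_cast
  ring

lemma d2v_append (a b : List String) : d2v (a ++ b) = d2v a + d2v b := by
  simp only [d2v, PySem.List.count_eq, List.count_append]
  push_cast
  ring

lemma balB_iff (l : List String) : balB l = true ↔ (d1v l = 0 ∧ d2v l = 0) := by
  simp [balB, d1v, d2v]; omega

lemma pvStep_eq (c1 c2 : Int) (zs : List Bool) (x : String) :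
    pvStep ((c1, c2), zs) x
      = ((c1 + d1v [x], c2 + d2v [x]),
         zs ++ [(c1 + d1v [x] == 0) && (c2 + d2v [x] == 0)]) := by
  by_cases h1 : x = "b" <;> by_cases h2 : x = "g" <;> by_cases h3 : x = "y" <;>
    simp_all [pvStep, d1v, d2v, PySem.List.count_eq, sub_eq_add_neg]

lemma foldStep (l : List String) : ∀ (c1 c2 : Int) (zs : List Bool),
    (l.foldl pvStep ((c1, c2), zs)).2
      = zs ++ (List.range l.length).map
          (fun k => (c1 + d1v (l.take (k+1)) == 0) && (c2 + d2v (l.take (k+1)) == 0)) := by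
  induction l with
  | nil => intro c1 c2 zs; simp
  | cons x t ih =>
    intro c1 c2 zs
    rw [List.foldl_cons, pvStep_eq, ih]
    rw [List.length_cons, List.range_succ_eq_map, List.map_cons, List.map_map]
    have hfun : ((fun k => (c1 + d1v ((x :: t).take (k+1)) == 0)
            && (c2 + d2v ((x :: t).take (k+1)) == 0)) ∘ Nat.succ)
        = (fun k => ((c1 + d1v [x]) + d1v (t.take (k+1)) == 0)
            && ((c2 + d2v [x]) + d2v (t.take (k+1)) == 0)) := by
      funext k
      have h1 : (x :: t).take (k + 1 + 1) = [x] ++ t.take (k+1) := by simp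
      simp only [Function.comp_apply, Nat.succ_eq_add_one, h1, d1v_append, d2v_append]
      rw [← add_assoc, ← add_assoc]
    rw [hfun]
    simp

lemma zeroList_eq (arr : List String) :
    (arr.foldl pvStep ((0, 0), [true])).2 = (List.range (arr.length + 1)).map (zA arr) := by
  rw [foldStep, List.range_succ_eq_map, List.map_cons, List.map_map]
  have h0 : zA arr 0 = true := by simp [zA, d1v, d2v, PySem.List.count_eq]
  have hfun : (zA arr ∘ Nat.succ)
      = (fun k => (0 + d1v (arr.take (k+1)) == 0) && (0 + d2v (arr.take (k+1)) == 0)) := by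
    funext k; simp [zA]
  rw [h0, hfun]
  rfl

lemma getZero (arr : List String) (k : Nat) (hn : k ≤ arr.length) :
    PySem.List.pyGetD (arr.foldl pvStep ((0, 0), [true])).2 (k : Int) false = zA arr k := by
  rw [zeroList_eq, PySem.List.pyGetD_natCast, PySem.List.getD_map_range]
  omega

lemma chain2 (F G : Nat → Int) (m : Nat) (hF0 : F 0 = 0) (hG0 : G 0 = 0)
    (hFm : F m = 0) (hGm : G m = 0) :
    (∀ k < m, F (k+1) = F k ∧ G (k+1) = G k) ↔ (∀ k < m, F k = 0 ∧ G k = 0) := by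
  constructor
  · intro h k hk
    induction k with
    | zero => exact ⟨hF0, hG0⟩
    | succ j ih =>
      have hj := h j (by omega)
      have hz := ih (by omega)
      exact ⟨hj.1.trans hz.1, hj.2.trans hz.2⟩
  · intro h k hk
    have hk0 := h k hk
    rcases Nat.lt_or_ge (k+1) m with h1 | h1
    · have := h (k+1) h1
      exact ⟨this.1.trans hk0.1.symm, this.2.trans hk0.2.symm⟩
    · have hkm : k + 1 = m := by omega
      rw [hkm]
      exact ⟨hFm.trans hk0.1.symm, hGm.trans hk0.2.symm⟩

-- the chunk-length-L range, in closed form, when L divides the length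
lemma pyRange_div (n L : Int) (hL : 0 < L) (hn : 0 ≤ n) (hdvd : L ∣ n) :
    PySem.List.pyRange 0 n L = (List.range ((n / L).toNat)).map (fun k : Nat => L * (k : Int)) := by
  have hcnt : (if (0:Int) < n then ((n - 0 + L - 1) / L).toNat else 0) = (n / L).toNat := by
    by_cases h0 : 0 < n
    · simp only [h0, if_pos]
      congr 1
      obtain ⟨m, rfl⟩ := hdvd
      have h1 : L * m - 0 + L - 1 = (L - 1) + m * L := by ring
      have h2 : L * m / L = m := Int.mul_ediv_cancel_left _ (by omega)
      rw [h2, h1, Int.add_mul_ediv_right _ _ (by omega : L ≠ 0)]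
      have h3 : (L - 1) / L = 0 := Int.ediv_eq_zero_of_lt (by omega) (by omega)
      rw [h3]
      ring
    · have hn0 : n = 0 := by omega
      simp [hn0]
  rw [PySem.List.pyRange_of_pos 0 n hL, hcnt]
  exact List.map_congr_left (fun k _ => by ring)

lemma perL (arr : List String) (hbal : balB arr = true) (L : Int) (hL : 3 ≤ L)
    (hdvd : L ∣ (arr.length : Int)) :
    ((PySem.List.pyRange 0 (arr.length : Int) L).map
        (fun i => PySem.List.slice arr (some i) (some (i + L)))).all balB
      = (PySem.List.pyRange 0 (arr.length : Int) L).all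
          (fun k => PySem.List.pyGetD (arr.foldl pvStep ((0, 0), [true])).2 k false) := by
  set n : Nat := arr.length with hn
  obtain ⟨c, hc, rfl⟩ : ∃ c : Nat, 0 < c ∧ L = (c : Int) :=
    ⟨L.toNat, by omega, by omega⟩
  obtain ⟨m, hm⟩ : ∃ m : Nat, n = m * c := by
    obtain ⟨q, hq⟩ := hdvd
    have hq0 : 0 ≤ q := by
      by_contra hneg
      have h1 : (c : Int) * q < 0 :=
        mul_neg_of_pos_of_neg (by exact_mod_cast hc) (lt_of_not_ge hneg)
      rw [← hq] at h1
      omega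
    refine ⟨q.toNat, ?_⟩
    have hcast : ((q.toNat : Int)) = q := Int.toNat_of_nonneg hq0
    have hgoal : (n : Int) = (q.toNat : Int) * (c : Int) := by
      rw [hcast, hq]; ring
    exact_mod_cast hgoal
  have hdivtoNat : (((n : Int) / (c : Int)).toNat) = m := by
    rw [hm]; push_cast
    rw [Int.mul_ediv_cancel _ (by omega)]
    omega
  rw [pyRange_div _ _ (by omega) (by omega) hdvd, hdivtoNat]
  rw [List.all_map, List.all_map, List.all_map]
  rw [Bool.eq_iff_iff]
  simp only [List.all_eq_true, List.mem_range, Function.comp_apply]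
  have hcast : ∀ k : Nat, (c : Int) * (k : Int) = ((c * k : Nat) : Int) := by
    intro k; push_cast; ring
  -- left side: each chunk is balanced; right side: each boundary prefix is balanced
  have hleft : ∀ k : Nat, k < m →
      (balB (PySem.List.slice arr (some ((c : Int) * k)) (some ((c : Int) * k + c))) = true
        ↔ (d1v (arr.take (c * (k+1))) = d1v (arr.take (c * k))
           ∧ d2v (arr.take (c * (k+1))) = d2v (arr.take (c * k)))) := by
    intro k hk
    rw [hcast k, PySem.List.slice_natCast_add arr (c * k) c, balB_iff]
    have htk : arr.take (c * (k + 1)) = arr.take (c * k) ++ (arr.drop (c * k)).take c := by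
      rw [Nat.mul_succ, List.take_add]
    rw [htk, d1v_append, d2v_append]
    constructor <;> intro h <;> constructor <;> omega
  have hright : ∀ k : Nat, k < m →
      (PySem.List.pyGetD (arr.foldl pvStep ((0, 0), [true])).2 ((c : Int) * k) false = true
        ↔ (d1v (arr.take (c * k)) = 0 ∧ d2v (arr.take (c * k)) = 0)) := by
    intro k hk
    rw [hcast k, getZero arr (c * k) (by nlinarith)]
    simp only [zA, Bool.and_eq_true, beq_iff_eq]
  constructor
  · intro h
    intro k hk
    rw [hright k hk]
    refine (chain2 (fun k => d1v (arr.take (c * k))) (fun k => d2v (arr.take (c * k))) m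
      ?_ ?_ ?_ ?_).mp ?_ k hk
    · simp [d1v, PySem.List.count_eq]
    · simp [d2v, PySem.List.count_eq]
    · show d1v (arr.take (c * m)) = 0
      have : arr.take (c * m) = arr := List.take_of_length_le (by nlinarith)
      rw [this]; exact ((balB_iff arr).mp hbal).1
    · show d2v (arr.take (c * m)) = 0
      have : arr.take (c * m) = arr := List.take_of_length_le (by nlinarith)
      rw [this]; exact ((balB_iff arr).mp hbal).2
    · intro k hk
      exact (hleft k hk).mp (h k hk)
  · intro h
    intro k hk
    rw [hleft k hk]
    have hz : ∀ j, j < m → (d1v (arr.take (c * j)) = 0 ∧ d2v (arr.take (c * j)) = 0) := by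
      intro j hj
      exact (hright j hj).mp (h j hj)
    have hz0 := hz k hk
    rcases Nat.lt_or_ge (k+1) m with h1 | h1
    · have := hz (k+1) h1
      exact ⟨this.1.trans hz0.1.symm, this.2.trans hz0.2.symm⟩
    · have hkm : k + 1 = m := by omega
      have harr : arr.take (c * (k+1)) = arr := by
        rw [hkm]; exact List.take_of_length_le (by nlinarith)
      rw [harr]
      exact ⟨((balB_iff arr).mp hbal).1.trans hz0.1.symm,
             ((balB_iff arr).mp hbal).2.trans hz0.2.symm⟩

-- the main equality on nonempty, 3-divisible, globally balanced input
lemma main_eq (arr : List String) :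
    count_subsets_equal_color arr = count_subsets_equal_color_alt arr := by
  by_cases h0 : arr = []
  · subst h0; rfl
  have hlen : 0 < arr.length := List.length_pos_iff.mpr h0
  by_cases h3 : PySem.Int.mod (arr.length : Int) 3 = 0
  case neg =>
    have h2 : (PySem.Int.mod (arr.length : Int) 3 == 0) = false := by
      rw [beq_eq_false_iff_ne]; exact h3
    have hga : (arr == [] || !(PySem.Int.mod (arr.length : Int) 3 == 0)
        || !((PySem.List.count arr "b" == PySem.List.count arr "g")
             && (PySem.List.count arr "g" == PySem.List.count arr "y"))) = true := by
      rw [h2]; simp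
    have hgb : (((arr.length : Int) == 0) || !(PySem.Int.mod (arr.length : Int) 3 == 0)) = true := by
      rw [h2]; simp
    simp only [count_subsets_equal_color, count_subsets_equal_color_alt, hga, hgb]
    rfl
  case pos =>
  by_cases hb : balB arr = true
  case neg =>
    have hzn : PySem.List.pyGetD (arr.foldl pvStep ((0, 0), [true])).2 (arr.length : Int) false = false := by
      rw [getZero arr arr.length le_rfl]
      simp only [zA, List.take_length]
      rw [balB_iff] at hb
      simp only [Bool.and_eq_false_iff]
      by_cases hd1 : d1v arr = 0
      · right; simp [hd1] at hb ⊢; omega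
      · left; simp; omega
    have hbf : ((PySem.List.count arr "b" == PySem.List.count arr "g")
        && (PySem.List.count arr "g" == PySem.List.count arr "y")) = false := by
      cases hx : ((PySem.List.count arr "b" == PySem.List.count arr "g")
          && (PySem.List.count arr "g" == PySem.List.count arr "y")) with
      | false => rfl
      | true => exact absurd hx hb
    have hga : (arr == [] || !(PySem.Int.mod (arr.length : Int) 3 == 0)
        || !((PySem.List.count arr "b" == PySem.List.count arr "g")
             && (PySem.List.count arr "g" == PySem.List.count arr "y"))) = true := by
      rw [hbf]; simp
    have hne : ((arr.length : Int) == 0) = false := by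
      simp only [beq_eq_false_iff_ne, ne_eq, Int.natCast_eq_zero]
      omega
    have h2 : (PySem.Int.mod (arr.length : Int) 3 == 0) = true := beq_iff_eq.mpr h3
    have hgb : (((arr.length : Int) == 0) || !(PySem.Int.mod (arr.length : Int) 3 == 0)) = false := by
      rw [hne, h2]; rfl
    simp only [count_subsets_equal_color, count_subsets_equal_color_alt, hga, hgb, hzn]
    rfl
  case pos =>
  -- both guards pass; compare the two loops as sums over the same filtered range
  have hA : count_subsets_equal_color arr
      = ((PySem.List.pyRange 3 (PySem.Int.floordiv (arr.length : Int) 2 + 1) 3).filter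
            (fun L => PySem.Int.mod (arr.length : Int) L == 0)).foldl
          (fun acc L =>
            if ((PySem.List.pyRange 0 (arr.length : Int) L).map
                (fun i => PySem.List.slice arr (some i) (some (i + L)))).all balB
            then acc + (((PySem.List.pyRange 0 (arr.length : Int) L).map
                (fun i => PySem.List.slice arr (some i) (some (i + L)))).length : Int)
            else acc) 0 + 1 := by
    have hbal' : ([arr].all balB) = true := by simp [hb]
    have hbt : ((PySem.List.count arr "b" == PySem.List.count arr "g")
        && (PySem.List.count arr "g" == PySem.List.count arr "y")) = true := hb
    have h1 : (arr == []) = false := by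
      rw [beq_eq_false_iff_ne]; exact h0
    have h2 : (PySem.Int.mod (arr.length : Int) 3 == 0) = true := beq_iff_eq.mpr h3
    have hga : (arr == [] || !(PySem.Int.mod (arr.length : Int) 3 == 0)
        || !((PySem.List.count arr "b" == PySem.List.count arr "g")
             && (PySem.List.count arr "g" == PySem.List.count arr "y"))) = false := by
      rw [h1, h2, hbt]; rfl
    simp only [count_subsets_equal_color, find_partitions]
    rw [if_neg (by rw [hga]; exact Bool.false_ne_true)]
    rw [PySem.List.foldl_append_if
      (fun L => PySem.Int.mod (arr.length : Int) L == 0)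
      (fun L => (PySem.List.pyRange 0 (arr.length : Int) L).map
                (fun i => PySem.List.slice arr (some i) (some (i + L))))]
    rw [List.nil_append, List.foldl_append, List.foldl_cons, List.foldl_nil]
    rw [List.foldl_map]
    rw [show (fun subset : List String =>
        (PySem.List.count subset "b" == PySem.List.count subset "g")
        && (PySem.List.count subset "g" == PySem.List.count subset "y")) = balB from rfl]
    rw [if_pos hbal']
    simp
  have hB : count_subsets_equal_color_alt arr
      = ((PySem.List.pyRange 3 (PySem.Int.floordiv (arr.length : Int) 2 + 1) 3).filter
            (fun L => PySem.Int.mod (arr.length : Int) L == 0)).foldl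
          (fun acc L =>
            if (PySem.List.pyRange 0 (arr.length : Int) L).all
                (fun k => PySem.List.pyGetD (arr.foldl pvStep ((0, 0), [true])).2 k false)
            then acc + PySem.Int.floordiv (arr.length : Int) L
            else acc) 1 := by
    have hzn : PySem.List.pyGetD (arr.foldl pvStep ((0, 0), [true])).2 (arr.length : Int) false = true := by
      rw [getZero arr arr.length le_rfl]
      simp only [zA, List.take_length]
      rw [balB_iff] at hb
      simp [hb.1, hb.2]
    have hne : ((arr.length : Int) == 0) = false := by
      simp only [beq_eq_false_iff_ne, ne_eq, Int.natCast_eq_zero]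
      omega
    have h2 : (PySem.Int.mod (arr.length : Int) 3 == 0) = true := beq_iff_eq.mpr h3
    have hgb : (((arr.length : Int) == 0) || !(PySem.Int.mod (arr.length : Int) 3 == 0)) = false := by
      rw [hne, h2]; rfl
    simp only [count_subsets_equal_color_alt]
    rw [if_neg (by rw [hgb]; exact Bool.false_ne_true)]
    rw [if_neg (by rw [hzn]; simp)]
    rw [PySem.List.foldl_congr_mem _ _
      (fun acc L =>
        if (PySem.Int.mod (arr.length : Int) L == 0)
        then (if (PySem.List.pyRange 0 (arr.length : Int) L).all
                (fun k => PySem.List.pyGetD (arr.foldl pvStep ((0, 0), [true])).2 k false)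
              then acc + PySem.Int.floordiv (arr.length : Int) L else acc)
        else acc) 1
      (by intro acc L _; by_cases hp : PySem.Int.mod (arr.length : Int) L == 0 <;> simp [hp])]
    rw [PySem.List.foldl_if_eq_foldl_filter]
  rw [hA, hB]
  have hcong : ∀ (init : Int),
      ((PySem.List.pyRange 3 (PySem.Int.floordiv (arr.length : Int) 2 + 1) 3).filter
            (fun L => PySem.Int.mod (arr.length : Int) L == 0)).foldl
          (fun acc L =>
            if ((PySem.List.pyRange 0 (arr.length : Int) L).map
                (fun i => PySem.List.slice arr (some i) (some (i + L)))).all balB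
            then acc + (((PySem.List.pyRange 0 (arr.length : Int) L).map
                (fun i => PySem.List.slice arr (some i) (some (i + L)))).length : Int)
            else acc) init
        = ((PySem.List.pyRange 3 (PySem.Int.floordiv (arr.length : Int) 2 + 1) 3).filter
            (fun L => PySem.Int.mod (arr.length : Int) L == 0)).foldl
          (fun acc L =>
            if (PySem.List.pyRange 0 (arr.length : Int) L).all
                (fun k => PySem.List.pyGetD (arr.foldl pvStep ((0, 0), [true])).2 k false)
            then acc + PySem.Int.floordiv (arr.length : Int) L
            else acc) init := by
    intro init
    apply PySem.List.foldl_congr_mem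
    intro acc L hLmem
    rw [List.mem_filter] at hLmem
    obtain ⟨hLR, hLp⟩ := hLmem
    have hL3 : 3 ≤ L := ((PySem.List.mem_pyRange_iff_of_pos (by omega) L).mp hLR).1
    have hdvd : L ∣ (arr.length : Int) := (PySem.Int.mod_eq_zero_iff_dvd _ _).mp (by simpa using hLp)
    rw [perL arr hb L hL3 hdvd]
    have hlenq : (((PySem.List.pyRange 0 (arr.length : Int) L).map
          (fun i => PySem.List.slice arr (some i) (some (i + L)))).length : Int)
        = PySem.Int.floordiv (arr.length : Int) L := by
      rw [List.length_map, pyRange_div _ _ (by omega) (by omega) hdvd, List.length_map,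
        List.length_range, PySem.Int.floordiv_eq_ediv_of_pos (by omega)]
      have : 0 ≤ (arr.length : Int) / L := Int.ediv_nonneg (by omega) (by omega)
      omega
    rw [hlenq]
  rw [← hcong 1]
  -- shift A's initial value: the fold is init plus a sum independent of init
  have hsum : ∀ init : Int,
      ((PySem.List.pyRange 3 (PySem.Int.floordiv (arr.length : Int) 2 + 1) 3).filter
            (fun L => PySem.Int.mod (arr.length : Int) L == 0)).foldl
          (fun acc L =>
            if ((PySem.List.pyRange 0 (arr.length : Int) L).map
                (fun i => PySem.List.slice arr (some i) (some (i + L)))).all balB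
            then acc + (((PySem.List.pyRange 0 (arr.length : Int) L).map
                (fun i => PySem.List.slice arr (some i) (some (i + L)))).length : Int)
            else acc) init
      = init + (((PySem.List.pyRange 3 (PySem.Int.floordiv (arr.length : Int) 2 + 1) 3).filter
            (fun L => PySem.Int.mod (arr.length : Int) L == 0)).map
          (fun L =>
            if ((PySem.List.pyRange 0 (arr.length : Int) L).map
                (fun i => PySem.List.slice arr (some i) (some (i + L)))).all balB
            then (((PySem.List.pyRange 0 (arr.length : Int) L).map
                (fun i => PySem.List.slice arr (some i) (some (i + L)))).length : Int)
            else 0)).sum := by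
    intro init
    rw [PySem.List.foldl_congr_mem _ _
      (fun acc L => acc +
        (if ((PySem.List.pyRange 0 (arr.length : Int) L).map
                (fun i => PySem.List.slice arr (some i) (some (i + L)))).all balB
         then (((PySem.List.pyRange 0 (arr.length : Int) L).map
                (fun i => PySem.List.slice arr (some i) (some (i + L)))).length : Int)
         else 0)) init
      (by
        intro acc L _
        by_cases hc : ((PySem.List.pyRange 0 (arr.length : Int) L).map
            (fun i => PySem.List.slice arr (some i) (some (i + L)))).all balB <;> simp [hc])]
    exact PySem.List.foldl_add _ _ init
  rw [hsum 0, hsum 1]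
  ring

-- ===== VERDICT =====
theorem count_subsets_equal_color_spec : Claim_equal_count_subsets_equal_color := by
  intro arr _
  unfold Spec_count_subsets_equal_color
  exact main_eq arr
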